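-- pv_equiv track=rewrite | github.com/rakesh-suru/leetcode_solutions | 1637/sol1.py | maxWidthOfVerticalArea
-- ===== SOURCE A (Python) =====
-- from typing import List
--
-- def maxWidthOfVerticalArea(points: List[List[int]]) -> int:
--     ans = 0
--     temp = []
--     for i in points:
--         temp.append(i[0])
--     temp.sort()
--
--     for i in range(len(temp)-1):
--         ans = temp[i+1] - temp[i] if ans < temp[i+1] - temp[i] else ans
--
--     return ans
-- ===== SOURCE B (Python) =====
-- def maxWidthOfVerticalArea(points):
--     # For each x-coordinate, the gap to the largest coordinate smaller than it;
--     # the answer is the maximum such gap (no sorting).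
--     xs = [p[0] for p in points]
--     ans = 0
--     for x in xs:
--         smaller = [y for y in xs if y < x]
--         if smaller:
--             d = x - max(smaller)
--             if d > ans:
--                 ans = d
--     return ans
-- ===== Notes on version B (the rewrite author's own statement) =====
-- stated objective: alternative
-- what changed: B does not sort: for every x-coordinate it computes the gap to the largest coordinate strictly smaller than it and returns the maximum of these gaps, which equals the maximum adjacent gap of the sorted coordinates.
import Mathlib
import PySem

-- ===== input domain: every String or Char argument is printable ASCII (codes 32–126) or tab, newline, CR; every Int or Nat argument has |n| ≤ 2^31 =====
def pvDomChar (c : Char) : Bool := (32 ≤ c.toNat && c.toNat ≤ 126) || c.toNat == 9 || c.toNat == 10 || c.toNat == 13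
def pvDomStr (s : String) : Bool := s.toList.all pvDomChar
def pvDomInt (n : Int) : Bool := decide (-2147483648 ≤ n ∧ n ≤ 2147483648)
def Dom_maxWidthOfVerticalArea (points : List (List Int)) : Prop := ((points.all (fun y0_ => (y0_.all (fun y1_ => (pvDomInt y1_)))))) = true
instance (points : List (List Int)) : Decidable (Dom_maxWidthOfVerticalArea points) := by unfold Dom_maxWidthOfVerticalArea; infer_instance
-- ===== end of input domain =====

-- B avoids sorting: over all x-coordinates it takes the maximum gap to the largest
-- strictly smaller coordinate (an alternative O(n^2) algorithm, not claimed faster).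

-- ===== PORT A =====
def maxWidthOfVerticalArea (points : List (List Int)) : Int :=
  -- temp built by appending i[0]; i[0] is in range under Pre_
  let temp := points.foldl (fun acc i => acc ++ [PySem.List.pyGetD i 0 0]) []
  let temp := PySem.List.sorted temp (fun x => x) false
  (PySem.List.pyRange 0 ((temp.length : Int) - 1) 1).foldl
    (fun ans i =>
      if ans < PySem.List.pyGetD temp (i + 1) 0 - PySem.List.pyGetD temp i 0 then
        PySem.List.pyGetD temp (i + 1) 0 - PySem.List.pyGetD temp i 0
      else ans) 0

-- ===== PORT B =====
def maxWidthOfVerticalArea_alt (points : List (List Int)) : Int :=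
  let xs := points.map (fun p => PySem.List.pyGetD p 0 0)
  xs.foldl (fun ans x =>
    let smaller := xs.filter (fun y => decide (y < x))
    if smaller.isEmpty then ans
    else
      let d := x - (PySem.List.max? smaller (fun y => y)).getD 0
      if d > ans then d else ans) 0

-- ===== PRECONDITION & SPEC =====
-- Pre_ excludes exactly the inputs on which Python A raises IndexError (a point with
-- no coordinates, so i[0] is out of range); B raises there as well.
def Pre_maxWidthOfVerticalArea (points : List (List Int)) : Prop :=
  ∀ p ∈ points, p ≠ []
instance (points : List (List Int)) : Decidable (Pre_maxWidthOfVerticalArea points) := by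
  unfold Pre_maxWidthOfVerticalArea; infer_instance
def pvWitness_maxWidthOfVerticalArea : List (List Int) := [[3, 1], [9, 0], [1, 0], [1, 7]]

def Spec_maxWidthOfVerticalArea (points : List (List Int)) (out : Int) : Prop := out = maxWidthOfVerticalArea_alt points
instance (points : List (List Int)) (out : Int) : Decidable (Spec_maxWidthOfVerticalArea points out) := by unfold Spec_maxWidthOfVerticalArea; infer_instance

-- ===== CLAIM (what is proved, stated in full; the proofs are below) =====
def Claim_equal_maxWidthOfVerticalArea : Prop := ∀ (points : List (List Int)), Dom_maxWidthOfVerticalArea points → Pre_maxWidthOfVerticalArea points → Spec_maxWidthOfVerticalArea points (maxWidthOfVerticalArea points)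

-- ===== LEMMAS AND PROOFS =====

-- structural form of A's index loop: running max of adjacent differences
def gfold : Int → List Int → Int
  | ans, a :: b :: t => gfold (if ans < b - a then b - a else ans) (b :: t)
  | ans, _ => ans

-- the list of adjacent differences
def gaps : List Int → List Int
  | a :: b :: t => (b - a) :: gaps (b :: t)
  | _ => []

-- B's per-element contribution, relative to the coordinate list l
def contrib (l : List Int) (x : Int) : Int :=
  if (l.filter (fun y => decide (y < x))).isEmpty then 0
  else x - (PySem.List.max? (l.filter (fun y => decide (y < x))) (fun y => y)).getD 0

lemma gfold_eq_foldl (l : List Int) : ∀ ans : Int, gfold ans l = (gaps l).foldl max ans := by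
  induction l with
  | nil => intro ans; simp [gfold, gaps]
  | cons a t ih =>
    intro ans
    cases t with
    | nil => simp [gfold, gaps]
    | cons b t' =>
      simp only [gfold, gaps, List.foldl_cons]
      rw [ih]
      congr 1
      by_cases h : ans < b - a <;> simp [max_def, h] <;> omega

lemma gaps_mem {g : Int} {l : List Int} (h : g ∈ gaps l) :
    ∃ u v a b, l = u ++ a :: b :: v ∧ g = b - a := by
  induction l with
  | nil => simp [gaps] at h
  | cons a t ih =>
    cases t with
    | nil => simp [gaps] at h
    | cons b t' =>
      simp only [gaps, List.mem_cons] at h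
      rcases h with h | h
      · exact ⟨[], t', a, b, by simp, h⟩
      · obtain ⟨u, v, a', b', he, hg⟩ := ih h
        exact ⟨a :: u, v, a', b', by simp [he], hg⟩

-- A's indexed fold equals gfold (Nat-range version)
lemma natfold_eq_gfold (l : List Int) : ∀ ans : Int,
    (List.range (l.length - 1)).foldl
      (fun ans k => if ans < l.getD (k + 1) 0 - l.getD k 0 then l.getD (k + 1) 0 - l.getD k 0 else ans) ans
    = gfold ans l := by
  induction l with
  | nil => intro ans; simp [gfold]
  | cons a t ih =>
    intro ans
    cases t with
    | nil => simp [gfold]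
    | cons b t' =>
      have hlen : (a :: b :: t').length - 1 = (b :: t').length - 1 + 1 := by simp
      rw [hlen, List.range_succ_eq_map, List.foldl_cons, List.foldl_map]
      simp only [List.getD_cons_succ, List.getD_cons_zero]
      rw [show (gfold ans (a :: b :: t')) = gfold (if ans < b - a then b - a else ans) (b :: t') from rfl]
      rw [← ih]
      rfl

lemma idxfold_eq_gfold (l : List Int) :
    (PySem.List.pyRange 0 ((l.length : Int) - 1) 1).foldl
      (fun ans i =>
        if ans < PySem.List.pyGetD l (i + 1) 0 - PySem.List.pyGetD l i 0 then
          PySem.List.pyGetD l (i + 1) 0 - PySem.List.pyGetD l i 0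
        else ans) 0
    = gfold 0 l := by
  rw [PySem.List.pyRange_one, List.foldl_map, ← natfold_eq_gfold l 0]
  have harg : ((l.length : Int) - 1 - 0).toNat = l.length - 1 := by omega
  rw [harg]
  apply List.foldl_ext
  intro a k _
  have e1 : (0 : Int) + (k : Int) = ((k : Nat) : Int) := by ring
  have e2 : ((k : Int)) + 1 = (((k + 1) : Nat) : Int) := by push_cast; ring
  rw [e1, e2, PySem.List.pyGetD_natCast, PySem.List.pyGetD_natCast]

-- B's loop is a running max of contributions (the accumulator stays nonnegative)
lemma bfold_eq_maxfold (xs : List Int) (l : List Int) : ∀ ans : Int, 0 ≤ ans →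
    l.foldl (fun ans x =>
      let smaller := xs.filter (fun y => decide (y < x))
      if smaller.isEmpty then ans
      else
        let d := x - (PySem.List.max? smaller (fun y => y)).getD 0
        if d > ans then d else ans) ans
    = l.foldl (fun a x => max a (contrib xs x)) ans := by
  induction l with
  | nil => intro ans _; rfl
  | cons x t ih =>
    intro ans hans
    simp only [List.foldl_cons]
    have hstep :
        (let smaller := xs.filter (fun y => decide (y < x))
         if smaller.isEmpty then ans
         else
           let d := x - (PySem.List.max? smaller (fun y => y)).getD 0
           if d > ans then d else ans)
        = max ans (contrib xs x) := by
      simp only [contrib]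
      by_cases h : (xs.filter (fun y => decide (y < x))).isEmpty
      · simp [h]; omega
      · simp only [h]
        by_cases h2 : x - (PySem.List.max? (xs.filter (fun y => decide (y < x))) (fun y => y)).getD 0 > ans <;>
          simp [h2, max_def] <;> omega
    rw [hstep, ih _ (le_trans hans (le_max_left _ _))]

-- contributions depend only on the multiset of coordinates
lemma maxD_perm {l1 l2 : List Int} (h : l1.Perm l2) :
    (PySem.List.max? l1 (fun y => y)).getD 0 = (PySem.List.max? l2 (fun y => y)).getD 0 := by
  cases h1 : PySem.List.max? l1 (fun y => y) with
  | none =>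
    have e1 : l1 = [] := (PySem.List.max?_eq_none_iff _ _).1 h1
    subst e1
    have e2 : l2 = [] := h.symm.eq_nil
    subst e2
    rfl
  | some m1 =>
    cases h2 : PySem.List.max? l2 (fun y => y) with
    | none =>
      have e2 : l2 = [] := (PySem.List.max?_eq_none_iff _ _).1 h2
      subst e2
      have e1 : l1 = [] := h.eq_nil
      subst e1
      simp [PySem.List.max?] at h1
    | some m2 =>
      have hm1 : m1 ∈ l1 := PySem.List.max?_mem h1
      have hm2 : m2 ∈ l2 := PySem.List.max?_mem h2
      have h12 : m1 ≤ m2 := PySem.List.max?_isMax h2 m1 (h.mem_iff.1 hm1)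
      have h21 : m2 ≤ m1 := PySem.List.max?_isMax h1 m2 (h.symm.mem_iff.1 hm2)
      simp [le_antisymm h12 h21]

lemma contrib_perm {l1 l2 : List Int} (h : l1.Perm l2) (x : Int) :
    contrib l1 x = contrib l2 x := by
  have hf : (l1.filter (fun y => decide (y < x))).Perm (l2.filter (fun y => decide (y < x))) :=
    h.filter _
  have hl := hf.length_eq
  have hemp : (l1.filter (fun y => decide (y < x))).isEmpty
      = (l2.filter (fun y => decide (y < x))).isEmpty := by
    rw [Bool.eq_iff_iff]
    simp only [List.isEmpty_iff_length_eq_zero, hl]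
  simp only [contrib]
  rw [hemp, maxD_perm hf]

-- bounds for a running max
lemma foldl_max_le (L : List Int) (init z : Int) (h0 : init ≤ z) (h : ∀ x ∈ L, x ≤ z) :
    L.foldl max init ≤ z := by
  rcases PySem.List.foldl_max_mem L init with he | he
  · omega
  · exact h _ he

-- any element of s smaller than b is at most a, when a is b's left neighbour
lemma pred_bound {s u v : List Int} {a b : Int} (hs : s.Pairwise (· ≤ ·))
    (he : s = u ++ a :: b :: v) : ∀ y ∈ s, y < b → y ≤ a := by
  subst he
  rw [List.pairwise_append] at hs
  obtain ⟨_, hw, hcross⟩ := hs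
  rw [List.pairwise_cons] at hw
  obtain ⟨ha, hw2⟩ := hw
  rw [List.pairwise_cons] at hw2
  obtain ⟨hb, _⟩ := hw2
  intro y hy hyb
  rcases List.mem_append.1 hy with hyu | hyc
  · exact hcross y hyu a (by simp)
  · rcases List.mem_cons.1 hyc with rfl | hyc2
    · exact le_refl y
    · rcases List.mem_cons.1 hyc2 with rfl | hyc3
      · omega
      · exact absurd (hb y hyc3) (by omega)

-- crossing: if no coordinate lies strictly between m and x, some adjacent gap covers x - m
lemma crossing : ∀ (s : List Int), s.Pairwise (· ≤ ·) → ∀ m x : Int, m ∈ s → x ∈ s → m < x →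
    (∀ y ∈ s, y < x → y ≤ m) → ∃ g ∈ gaps s, x - m ≤ g := by
  intro s
  induction s with
  | nil => intro _ m x hm; simp at hm
  | cons a t ih =>
    intro hp m x hm hx hmx hub
    rcases t with _ | ⟨b, t'⟩
    · simp at hm hx; omega
    rw [List.pairwise_cons] at hp
    obtain ⟨ha, hpt⟩ := hp
    have hab : a ≤ b := ha b (by simp)
    have ham : a ≤ m := by
      rcases List.mem_cons.1 hm with rfl | h
      · exact le_refl m
      · exact ha m h
    have hxt : x ∈ b :: t' := by
      rcases List.mem_cons.1 hx with rfl | h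
      · exact absurd hmx (by omega)
      · exact h
    have hbx : b ≤ x := by
      rcases List.mem_cons.1 hxt with rfl | h
      · exact le_refl x
      · exact (List.pairwise_cons.1 hpt).1 x h
    by_cases hb : b < x
    · -- recurse into the tail
      have hbm : b ≤ m := hub b (by simp) hb
      have hmt : m ∈ b :: t' := by
        rcases List.mem_cons.1 hm with rfl | h
        · have hba : m = b := le_antisymm hab hbm
          rw [hba]; exact List.mem_cons_self
        · exact h
      obtain ⟨g, hg, hle⟩ := ih hpt m x hmt hxt hmx
        (fun y hy hyx => hub y (List.mem_cons_of_mem _ hy) hyx)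
      exact ⟨g, List.mem_cons_of_mem _ hg, hle⟩
    · -- x = b, and then m = a: the head gap works
      have hxb : x = b := le_antisymm (by omega) hbx
      have hma : m = a := by
        rcases List.mem_cons.1 hm with rfl | h
        · rfl
        · exfalso
          have hbm : b ≤ m := by
            rcases List.mem_cons.1 h with rfl | h2
            · exact le_refl m
            · exact (List.pairwise_cons.1 hpt).1 m h2
          omega
      exact ⟨b - a, by simp [gaps], by omega⟩

-- core: on a sorted list, max contribution = max adjacent gap
lemma sorted_core (s : List Int) (hs : s.Pairwise (· ≤ ·)) :
    s.foldl (fun a x => max a (contrib s x)) 0 = (gaps s).foldl max 0 := by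
  have hR2 : s.foldl (fun a x => max a (contrib s x)) 0 = (s.map (contrib s)).foldl max 0 := by
    rw [List.foldl_map]
  rw [hR2]
  apply le_antisymm
  · -- every contribution is covered by some adjacent gap
    apply foldl_max_le
    · exact (PySem.List.le_foldl_max (gaps s) 0).1
    · intro v hv
      obtain ⟨x, hxs, hvx⟩ := List.mem_map.1 hv
      subst hvx
      simp only [contrib]
      by_cases he : (s.filter (fun y => decide (y < x))).isEmpty
      · simpa [he] using (PySem.List.le_foldl_max (gaps s) 0).1
      · simp only [he]
        have hne : s.filter (fun y => decide (y < x)) ≠ [] := by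
          simpa [List.isEmpty_iff] using he
        obtain ⟨m, hm⟩ : ∃ m, PySem.List.max? (s.filter (fun y => decide (y < x))) (fun y => y) = some m := by
          cases hmm : PySem.List.max? (s.filter (fun y => decide (y < x))) (fun y => y) with
          | none => exact absurd ((PySem.List.max?_eq_none_iff _ _).1 hmm) hne
          | some m => exact ⟨m, rfl⟩
        rw [hm]
        have hmmem := PySem.List.max?_mem hm
        rw [List.mem_filter] at hmmem
        obtain ⟨hms, hmx⟩ := hmmem
        have hmx : m < x := by simpa using hmx
        have hub : ∀ y ∈ s, y < x → y ≤ m := by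
          intro y hy hyx
          exact PySem.List.max?_isMax hm y (List.mem_filter.2 ⟨hy, by simpa using hyx⟩)
        obtain ⟨g, hg, hle⟩ := crossing s hs m x hms hxs hmx hub
        calc x - (some m).getD 0 = x - m := rfl
          _ ≤ g := hle
          _ ≤ (gaps s).foldl max 0 := (PySem.List.le_foldl_max (gaps s) 0).2 g hg
  · -- every adjacent gap is covered by the right endpoint's contribution
    apply foldl_max_le
    · exact (PySem.List.le_foldl_max (s.map (contrib s)) 0).1
    · intro g hg
      obtain ⟨u, v, a, b, he, hgv⟩ := gaps_mem hg
      subst hgv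
      by_cases hab : a < b
      · have hbs : b ∈ s := by rw [he]; simp
        have has : a ∈ s := by rw [he]; simp
        have hne : a ∈ s.filter (fun y => decide (y < b)) :=
          List.mem_filter.2 ⟨has, by simpa using hab⟩
        have hemp : (s.filter (fun y => decide (y < b))).isEmpty = false := by
          rcases hf : s.filter (fun y => decide (y < b)) with _ | _
          · rw [hf] at hne; simp at hne
          · simp
        obtain ⟨m, hm⟩ : ∃ m, PySem.List.max? (s.filter (fun y => decide (y < b))) (fun y => y) = some m := by
          cases hmm : PySem.List.max? (s.filter (fun y => decide (y < b))) (fun y => y) with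
          | none =>
            rw [PySem.List.max?_eq_none_iff _ _] at hmm
            rw [hmm] at hne; simp at hne
          | some m => exact ⟨m, rfl⟩
        have hmmem := PySem.List.max?_mem hm
        rw [List.mem_filter] at hmmem
        obtain ⟨hms, hmb⟩ := hmmem
        have hmb : m < b := by simpa using hmb
        have hma : m ≤ a := pred_bound hs he m hms hmb
        have hcb : contrib s b = b - m := by
          simp [contrib, hemp, hm]
        have : b - a ≤ contrib s b := by rw [hcb]; omega
        calc b - a ≤ contrib s b := this
          _ ≤ (s.map (contrib s)).foldl max 0 :=
            (PySem.List.le_foldl_max (s.map (contrib s)) 0).2 _ (List.mem_map_of_mem hbs)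
      · have h0 : b - a ≤ 0 := by omega
        exact le_trans h0 ((PySem.List.le_foldl_max (s.map (contrib s)) 0).1)

-- ===== VERDICT (by name: the statement is the Claim_ definition above) =====
theorem maxWidthOfVerticalArea_spec : Claim_equal_maxWidthOfVerticalArea := by
  intro points _ _
  unfold Spec_maxWidthOfVerticalArea maxWidthOfVerticalArea maxWidthOfVerticalArea_alt
  simp only [PySem.List.foldl_append_singleton_eq_map, List.nil_append]
  set xs := points.map (fun p => PySem.List.pyGetD p 0 0) with hxs
  set s := PySem.List.sorted xs (fun x => x) false with hsdef
  have hperm : s.Perm xs := PySem.List.sorted_perm xs (fun x => x) false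
  have hsort : s.Pairwise (· ≤ ·) := by simpa using PySem.List.sorted_pairwise xs (fun x => x)
  -- A's side
  rw [idxfold_eq_gfold s, gfold_eq_foldl]
  -- B's side
  rw [bfold_eq_maxfold xs xs 0 le_rfl]
  have hbp : xs.foldl (fun a x => max a (contrib xs x)) 0
      = s.foldl (fun a x => max a (contrib xs x)) 0 := by
    letI : RightCommutative (fun (a : Int) x => max a (contrib xs x)) :=
      ⟨by intro a b c'; simp [max_assoc, max_comm (contrib xs b)]⟩
    exact (hperm.symm.foldl_eq 0)
  rw [hbp]
  have hce : s.foldl (fun a x => max a (contrib xs x)) 0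
      = s.foldl (fun a x => max a (contrib s x)) 0 := by
    apply List.foldl_ext
    intro a x _
    rw [contrib_perm hperm.symm x]
  rw [hce, sorted_core s hsort]
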